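-- pv_equiv track=rewrite | github.com/Vipin-hari/Practice | PYTHON/Peakelement.py | Peaknumber
-- ===== SOURCE A (Python) =====
-- def Peaknumber(arr, a):
--     x = a - 1
--     peak = 0
--     for i in range(x):
--         if i == 0:
--             if arr[i] > arr[i + 1] and arr[i] > arr[x]:
--                 peak = arr[i]
--         elif 0 < i < x:
--             if arr[i] > arr[i + 1] and arr[i] > arr[i - 1]:
--                 peak = arr[i]
--         elif i == x:
--             if arr[i] > arr[0] and arr[i] > arr[i - 1]:
--                 peak = arr[i]
--     return peak
-- ===== SOURCE B (Python) =====
-- def Peaknumber(arr, a):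
--     x = a - 1
--     for i in range(x - 1, -1, -1):
--         if i == 0:
--             if arr[0] > arr[1] and arr[0] > arr[x]:
--                 return arr[0]
--         elif arr[i] > arr[i + 1] and arr[i] > arr[i - 1]:
--             return arr[i]
--     return 0
-- ===== Notes on version B (the rewrite author's own statement) =====
-- stated objective: simpler
-- what changed: B scans the indices in reverse and returns at the first index passing the peak test (the last peak in array order), replacing A's forward scan that keeps overwriting an accumulator and A's dead i==x branch.
import Mathlib
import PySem

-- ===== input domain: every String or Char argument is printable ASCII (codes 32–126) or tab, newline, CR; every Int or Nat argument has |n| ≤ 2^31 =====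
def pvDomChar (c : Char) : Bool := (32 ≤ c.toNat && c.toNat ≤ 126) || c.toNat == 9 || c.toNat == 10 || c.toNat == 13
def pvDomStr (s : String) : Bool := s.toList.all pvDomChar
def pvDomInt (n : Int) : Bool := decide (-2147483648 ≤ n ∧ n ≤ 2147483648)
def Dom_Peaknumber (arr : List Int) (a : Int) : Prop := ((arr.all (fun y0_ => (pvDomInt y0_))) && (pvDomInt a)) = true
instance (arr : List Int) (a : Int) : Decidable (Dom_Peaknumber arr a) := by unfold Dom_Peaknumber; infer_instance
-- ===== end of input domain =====

-- B replaces A's forward accumulator scan (with a dead i==x branch) by a reverse scan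
-- returning at the first index that passes the peak test; objective: simpler.

-- arr[i] under Pre_ every accessed index is in range, so the default is never used
def pnGet (arr : List Int) (i : Int) : Int := (PySem.List.pyGet? arr i).getD 0

-- ===== PORT A =====
def Peaknumber (arr : List Int) (a : Int) : Int :=
  let x := a - 1
  (PySem.List.pyRange 0 x 1).foldl (fun peak i =>
    if i == 0 then
      if pnGet arr i > pnGet arr (i + 1) && pnGet arr i > pnGet arr x then pnGet arr i else peak
    else if 0 < i && i < x then
      if pnGet arr i > pnGet arr (i + 1) && pnGet arr i > pnGet arr (i - 1) then pnGet arr i else peak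
    else if i == x then
      if pnGet arr i > pnGet arr 0 && pnGet arr i > pnGet arr (i - 1) then pnGet arr i else peak
    else peak) 0

-- ===== PORT B =====
-- the peak test of Source B's loop body
def pnTest (arr : List Int) (x i : Int) : Bool :=
  if i == 0 then pnGet arr 0 > pnGet arr 1 && pnGet arr 0 > pnGet arr x
  else pnGet arr i > pnGet arr (i + 1) && pnGet arr i > pnGet arr (i - 1)

-- Source B's loop with its early return
def pnLoop (arr : List Int) (x : Int) : List Int → Int
  | [] => 0
  | i :: rest => if pnTest arr x i then pnGet arr i else pnLoop arr x rest

def Peaknumber_alt (arr : List Int) (a : Int) : Int :=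
  let x := a - 1
  pnLoop arr x (PySem.List.pyRange (x - 1) (-1) (-1))

-- ===== PRECONDITION & SPEC =====
-- Pre_ excludes exactly the inputs where Python A raises IndexError (a - 1 ≥ 1 but arr shorter than a)
def Pre_Peaknumber (arr : List Int) (a : Int) : Prop := a ≤ 1 ∨ a ≤ (arr.length : Int)
instance (arr : List Int) (a : Int) : Decidable (Pre_Peaknumber arr a) := by
  unfold Pre_Peaknumber; infer_instance

def pvWitness_Peaknumber : List Int × Int := ([1, 3, 2, 5, 1], 5)

def Spec_Peaknumber (arr : List Int) (a : Int) (out : Int) : Prop := out = Peaknumber_alt arr a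
instance (arr : List Int) (a : Int) (out : Int) : Decidable (Spec_Peaknumber arr a out) := by
  unfold Spec_Peaknumber; infer_instance

-- ===== CLAIM (what is proved, stated in full; the proofs are below) =====
def Claim_equal_Peaknumber : Prop := ∀ (arr : List Int) (a : Int), Dom_Peaknumber arr a → Pre_Peaknumber arr a → Spec_Peaknumber arr a (Peaknumber arr a)

-- ===== LEMMAS AND PROOFS =====

-- the forward fold that keeps the last match equals "first match of the reversed list"
theorem foldl_last_match (arr : List Int) (x : Int) :
    ∀ (l : List Int) (p : Int),
      l.foldl (fun peak i => if pnTest arr x i then pnGet arr i else peak) p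
        = (match l.reverse.find? (pnTest arr x) with
           | some i => pnGet arr i
           | none => p) := by
  intro l
  induction l with
  | nil => intro p; simp
  | cons h t ih =>
    intro p
    simp only [List.foldl_cons, ih, List.reverse_cons, List.find?_append]
    cases hf : t.reverse.find? (pnTest arr x) with
    | some i => simp
    | none =>
      by_cases hh : pnTest arr x h = true <;> simp [List.find?, hh]

-- Source B's early-return loop is "first match"
theorem pnLoop_eq_find (arr : List Int) (x : Int) :
    ∀ (l : List Int),
      pnLoop arr x l = (match l.find? (pnTest arr x) with
                        | some i => pnGet arr i
                        | none => 0) := by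
  intro l
  induction l with
  | nil => simp [pnLoop]
  | cons h t ih =>
    by_cases hh : pnTest arr x h = true <;> simp [pnLoop, List.find?, hh, ih]

-- on every element of range(x) A's branchy step equals the step over pnTest
theorem stepA_eq (arr : List Int) (x : Int) :
    ∀ i ∈ PySem.List.pyRange 0 x 1, ∀ peak : Int,
      (if i == 0 then
        if pnGet arr i > pnGet arr (i + 1) && pnGet arr i > pnGet arr x then pnGet arr i else peak
      else if 0 < i && i < x then
        if pnGet arr i > pnGet arr (i + 1) && pnGet arr i > pnGet arr (i - 1) then pnGet arr i else peak
      else if i == x then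
        if pnGet arr i > pnGet arr 0 && pnGet arr i > pnGet arr (i - 1) then pnGet arr i else peak
      else peak)
      = (if pnTest arr x i then pnGet arr i else peak) := by
  intro i hi peak
  rw [PySem.List.mem_pyRange_one] at hi
  by_cases h0 : i = 0
  · subst h0; simp [pnTest]
  · have h1 : (0 < i && i < x) = true := by
      simp only [Bool.and_eq_true, decide_eq_true_eq]; omega
    simp [pnTest, h0, h1]

theorem foldlA_eq (arr : List Int) (x : Int) :
    ∀ (l : List Int) (p : Int), (∀ i ∈ l, i ∈ PySem.List.pyRange 0 x 1) →
      l.foldl (fun peak i =>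
        if i == 0 then
          if pnGet arr i > pnGet arr (i + 1) && pnGet arr i > pnGet arr x then pnGet arr i else peak
        else if 0 < i && i < x then
          if pnGet arr i > pnGet arr (i + 1) && pnGet arr i > pnGet arr (i - 1) then pnGet arr i else peak
        else if i == x then
          if pnGet arr i > pnGet arr 0 && pnGet arr i > pnGet arr (i - 1) then pnGet arr i else peak
        else peak) p
        = l.foldl (fun peak i => if pnTest arr x i then pnGet arr i else peak) p := by
  intro l
  induction l with
  | nil => intro p _; rfl
  | cons h t ih =>
    intro p hmem
    simp only [List.foldl_cons]
    rw [stepA_eq arr x h (hmem h (List.mem_cons_self)) p]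
    exact ih _ (fun i hi => hmem i (List.mem_cons_of_mem _ hi))

-- ===== VERDICT (by name: the statement is the Claim_ definition above) =====
theorem Peaknumber_spec : Claim_equal_Peaknumber := by
  intro arr a _ _
  unfold Spec_Peaknumber Peaknumber Peaknumber_alt
  rw [foldlA_eq arr (a - 1) _ 0 (fun i hi => hi), foldl_last_match,
      pnLoop_eq_find, PySem.List.pyRange_neg_one_eq_reverse]
  norm_num
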